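-- pv_equiv track=rewrite | github.com/ShanRB/Codility-Lessons-Solution | src/Peaks.py | solution
-- ===== SOURCE A (Python) =====
-- def checkBlock(blockSize,peaks,N):
--     i = 0
--     pos = peaks[0]
--     while pos != 0:
--         if pos > i + blockSize:
--             break;
--         if pos >= i and pos < i + blockSize:
--             i += blockSize
--         pos = peaks[pos+1]
--     if i == N:
--         return True
--     return False
--
-- def solution(A):
--     # write your code in Python 3.6
--     N = len(A)
--     if N < 3:
--         return 0
--     peaks = [0 for _ in range(N)]
--     peakCount = 0
--     for i in range(N-2,0,-1):
--         if A[i] > A[i-1] and A[i] > A[i+1]: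
--             peaks[i] = i
--             peakCount += 1
--         else:
--             peaks[i] = peaks[i+1]
--     peaks[0] = peaks[1]
--     if not peakCount:
--         return 0
--
--     for n in range(peakCount,0,-1):
--         if N % n == 0:
--             divisor = N // n
--             if checkBlock(divisor,peaks,N):
--                 return n
--     return 0
-- ===== SOURCE B (Python) =====
-- def solution(A):
--     N = len(A)
--     if N < 3:
--         return 0
--     peaks = [i for i in range(1, N - 1) if A[i] > A[i - 1] and A[i] > A[i + 1]]
--     if not peaks:
--         return 0
--     for n in range(len(peaks), 0, -1):
--         if N % n == 0:
--             blockSize = N // n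
--             if len({p // blockSize for p in peaks}) == n:
--                 return n
--     return 0
-- ===== Notes on version B (the rewrite author's own statement) =====
-- stated objective: simpler
-- what changed: B collects peak indices into a plain list instead of A's next-peak pointer array and tests each candidate block count by counting distinct block indices {p // blockSize} instead of simulating A's block-to-block pointer jumps.
import Mathlib
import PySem

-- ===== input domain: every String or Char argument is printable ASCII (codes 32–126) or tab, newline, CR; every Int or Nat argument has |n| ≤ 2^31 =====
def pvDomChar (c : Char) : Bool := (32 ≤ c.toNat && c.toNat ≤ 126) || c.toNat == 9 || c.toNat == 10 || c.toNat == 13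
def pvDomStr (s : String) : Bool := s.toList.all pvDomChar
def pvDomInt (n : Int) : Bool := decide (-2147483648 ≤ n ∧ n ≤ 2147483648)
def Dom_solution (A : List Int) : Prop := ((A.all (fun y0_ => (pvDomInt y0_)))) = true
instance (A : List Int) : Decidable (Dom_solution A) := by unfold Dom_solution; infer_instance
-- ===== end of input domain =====

-- B replaces A's next-peak pointer array and its block-to-block jump simulation by a plain list
-- of peak indices and a distinct-block-index counting test; objective: simpler (no speed claim).

-- ===== PORT A =====
-- xs[i]: the index is always in range where either Python reads it; the default 0 only totalizes
def pvGet (xs : List Int) (i : Int) : Int := PySem.List.pyGetD xs i 0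

-- the 'while pos != 0' loop of checkBlock; fuel only totalizes it (on the arrays A builds,
-- pos strictly increases, so peaks.length + 2 iterations are never exhausted — proved below)
def checkLoop (peaks : List Int) (blockSize : Int) : Nat → Int → Int → Int
  | 0, i, _ => i
  | fuel + 1, i, pos =>
    if pos = 0 then i
    else if pos > i + blockSize then i
    else
      checkLoop peaks blockSize fuel
        (if pos ≥ i ∧ pos < i + blockSize then i + blockSize else i)
        (pvGet peaks (pos + 1))

def checkBlock (blockSize : Int) (peaks : List Int) (N : Int) : Bool :=
  decide (checkLoop peaks blockSize (peaks.length + 2) 0 (pvGet peaks 0) = N)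

-- 'for i in range(N-2, 0, -1)', counting down; the counter value is the loop index itself
def fillPeaks (A : List Int) : Nat → List Int → Nat → List Int × Nat
  | 0, P, cnt => (P, cnt)
  | i + 1, P, cnt =>
    if pvGet A (↑(i + 1)) > pvGet A (↑i) ∧ pvGet A (↑(i + 1)) > pvGet A (↑(i + 2)) then
      fillPeaks A i (P.set (i + 1) (↑(i + 1))) (cnt + 1)
    else
      fillPeaks A i (P.set (i + 1) (pvGet P (↑(i + 2)))) cnt

-- 'for n in range(peakCount, 0, -1)'
def searchA (peaks : List Int) (N : Int) : Nat → Int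
  | 0 => 0
  | n + 1 =>
    if PySem.Int.mod N (↑(n + 1)) = 0 then
      if checkBlock (PySem.Int.floordiv N (↑(n + 1))) peaks N then (↑(n + 1) : Int)
      else searchA peaks N n
    else searchA peaks N n

def solution (A : List Int) : Int :=
  let N := A.length
  if N < 3 then 0
  else
    let pc := fillPeaks A (N - 2) (List.replicate N 0) 0
    let peaks := pc.1.set 0 (pvGet pc.1 1)
    if pc.2 = 0 then 0
    else searchA peaks (↑N) pc.2

-- ===== PORT B =====
-- the peak test of B's comprehension
def predB (A : List Int) (i : Int) : Bool :=
  pvGet A i > pvGet A (i - 1) && pvGet A i > pvGet A (i + 1)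

-- peaks = [i for i in range(1, N-1) if A[i] > A[i-1] and A[i] > A[i+1]]
def peakList (A : List Int) : List Int :=
  (PySem.List.pyRange 1 ((A.length : Int) - 1)).filter (predB A)

-- 'for n in range(len(peaks), 0, -1)' with the set-of-block-indices coverage test
def searchB (N : Int) (peaks : List Int) : Nat → Int
  | 0 => 0
  | n + 1 =>
    if PySem.Int.mod N (↑(n + 1)) = 0 then
      let blockSize := PySem.Int.floordiv N (↑(n + 1))
      if (PySem.Set.ofList (peaks.map (fun p => PySem.Int.floordiv p blockSize))).length = n + 1
      then (↑(n + 1) : Int)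
      else searchB N peaks n
    else searchB N peaks n

def solution_alt (A : List Int) : Int :=
  let N := A.length
  if N < 3 then 0
  else
    let peaks := peakList A
    if peaks = [] then 0
    else searchB (↑N) peaks peaks.length

-- ===== PRECONDITION & SPEC =====
def Spec_solution (A : List Int) (out : Int) : Prop := out = solution_alt A
instance (A : List Int) (out : Int) : Decidable (Spec_solution A out) := by unfold Spec_solution; infer_instance

-- ===== CLAIM (what is proved, stated in full; the proofs are below) =====
def Claim_equal_solution : Prop := ∀ (A : List Int), Dom_solution A → Spec_solution A (solution A)

-- ===== LEMMAS AND PROOFS =====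

-- the first peak index ≥ j (0 if none): the value A's pointer array holds at position j
def np (A : List Int) (j : Nat) : Int :=
  if A.length - 1 ≤ j then 0
  else if predB A (↑j) then (↑j : Int) else np A (j + 1)
  termination_by A.length - 1 - j
  decreasing_by omega

-- block k (of size bs) contains a peak
def Covered (A : List Int) (bs : Int) (k : Nat) : Prop :=
  ∃ p ∈ peakList A, (↑k : Int) * bs ≤ p ∧ p < ((↑k : Int) + 1) * bs

lemma mem_peakList {A : List Int} {p : Int} :
    p ∈ peakList A ↔ 1 ≤ p ∧ p < (A.length : Int) - 1 ∧ predB A p = true := by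
  simp [peakList, List.mem_filter, PySem.List.mem_pyRange_one, and_assoc]

lemma np_mem {A : List Int} {j : Nat} (hj : 1 ≤ j) :
    np A j = 0 ∨ ((↑j : Int) ≤ np A j ∧ np A j ∈ peakList A) := by
  fun_induction np A j with
  | case1 j h => left; rfl
  | case2 j h hp =>
      right
      refine ⟨le_refl _, mem_peakList.2 ⟨by exact_mod_cast hj, by omega, hp⟩⟩
  | case3 j h hp ih =>
      rcases ih (by omega) with h0 | ⟨hle, hm⟩
      · left; exact h0
      · right; exact ⟨by push_cast at hle ⊢; omega, hm⟩

lemma np_least {A : List Int} {j : Nat} {p : Int} (hj : 1 ≤ j) (hp : p ∈ peakList A) (hjp : (↑j : Int) ≤ p) :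
    np A j ≠ 0 ∧ np A j ≤ p := by
  obtain ⟨hp1, hp2, hp3⟩ := mem_peakList.1 hp
  fun_induction np A j with
  | case1 j h =>
      exfalso
      have : ((j:Int)) ≥ (A.length : Int) - 1 := by omega
      omega
  | case2 j h hq =>
      refine ⟨fun h0 => ?_, hjp⟩
      have : j = 0 := by exact_mod_cast h0
      omega
  | case3 j h hq ih =>
      have hne : (↑j : Int) ≠ p := by rintro rfl; exact hq hp3
      exact ih (by omega) (by push_cast; omega)

lemma getD_set_ne (l : List Int) (i j : Nat) (v : Int) (h : i ≠ j) :
    (l.set i v).getD j 0 = l.getD j 0 := by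
  simp [List.getD, List.getElem?_set]
  rw [if_neg h]

lemma getD_set_self (l : List Int) (i : Nat) (v : Int) (h : i < l.length) :
    (l.set i v).getD i 0 = v := by
  simp [List.getD, h]

lemma np_unfold (A : List Int) (j : Nat) :
    np A j = if A.length - 1 ≤ j then 0 else if predB A (↑j) then (↑j : Int) else np A (j + 1) := by
  conv_lhs => rw [np]

lemma predB_succ (A : List Int) (i : Nat) :
    predB A (↑(i + 1)) = true ↔
      (pvGet A (↑(i + 1)) > pvGet A (↑i) ∧ pvGet A (↑(i + 1)) > pvGet A (↑(i + 2))) := by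
  simp only [predB, Bool.and_eq_true, decide_eq_true_eq, gt_iff_lt]
  push_cast
  ring_nf

lemma fill_spec (A : List Int) : ∀ (i : Nat) (P : List Int) (cnt : Nat),
    P.length = A.length → i + 2 ≤ A.length →
    (∀ j : Nat, i < j → j < A.length → P.getD j 0 = np A j) →
    (fillPeaks A i P cnt).1.length = A.length ∧
    (fillPeaks A i P cnt).1.getD 0 0 = P.getD 0 0 ∧
    (∀ j : Nat, 1 ≤ j → j < A.length → (fillPeaks A i P cnt).1.getD j 0 = np A j) ∧
    (fillPeaks A i P cnt).2 = cnt + ((PySem.List.pyRange 1 ((↑i : Int) + 1)).filter (predB A)).length := by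
  intro i
  induction i with
  | zero =>
      intro P cnt hlen _ hinv
      simp only [fillPeaks]
      refine ⟨hlen, by trivial, fun j hj hjN => hinv j (by omega) hjN, ?_⟩
      simp
  | succ i ih =>
      intro P cnt hlen hiN hinv
      have hnp1 : np A (i + 1) = if predB A (↑(i + 1)) then ((i + 1 : Nat) : Int) else np A (i + 2) := by
        rw [np_unfold]; rw [if_neg (by omega)]
      have hrange : PySem.List.pyRange 1 ((↑(i + 1) : Int) + 1)
          = PySem.List.pyRange 1 ((↑i : Int) + 1) ++ [((↑i : Int) + 1)] := by
        have h := PySem.List.pyRange_one_succ_right (a := 1) (b := (↑i : Int) + 1) (by omega)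
        rw [show ((↑(i + 1) : Int) + 1) = ((↑i : Int) + 1) + 1 by push_cast; ring, h]
      have hlast : ((↑i : Int) + 1) = ((i + 1 : Nat) : Int) := by push_cast; ring
      by_cases hc : pvGet A (↑(i + 1)) > pvGet A (↑i) ∧ pvGet A (↑(i + 1)) > pvGet A (↑(i + 2))
      · have hpb : predB A (↑(i + 1)) = true := (predB_succ A i).2 hc
        have hstep : fillPeaks A (i + 1) P cnt = fillPeaks A i (P.set (i + 1) ((i + 1 : Nat) : Int)) (cnt + 1) := by
          simp only [fillPeaks, if_pos hc]
        have hinv' : ∀ j : Nat, i < j → j < A.length → (P.set (i + 1) ((i + 1 : Nat) : Int)).getD j 0 = np A j := by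
          intro j hij hjN
          rcases Nat.eq_or_lt_of_le (Nat.succ_le_of_lt hij) with h | h
          · rw [← h, getD_set_self _ _ _ (by omega), hnp1, if_pos hpb]
          · rw [getD_set_ne _ _ _ _ (by omega)]; exact hinv j (by omega) hjN
        obtain ⟨l1, l2, l3, l4⟩ := ih (P.set (i + 1) ((i + 1 : Nat) : Int)) (cnt + 1) (by simp [hlen]) (by omega) hinv'
        rw [hstep]
        refine ⟨l1, ?_, l3, ?_⟩
        · rw [l2, getD_set_ne _ _ _ _ (by omega)]
        · rw [l4, hrange, List.filter_append, List.length_append]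
          have hpb' : predB A ((↑i : Int) + 1) = true := by rw [hlast]; exact hpb
          have h1 : (List.filter (predB A) [((↑i : Int) + 1)]).length = 1 := by
            simp [List.filter, hpb']
          omega
      · have hpb : predB A (↑(i + 1)) = false := by
          rcases Bool.eq_false_or_eq_true (predB A (↑(i + 1))) with h | h
          · exact absurd ((predB_succ A i).1 h) hc
          · exact h
        have hstep : fillPeaks A (i + 1) P cnt = fillPeaks A i (P.set (i + 1) (pvGet P (↑(i + 2)))) cnt := by
          simp only [fillPeaks, if_neg hc]
        have hval : pvGet P (↑(i + 2)) = np A (i + 2) := by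
          rw [pvGet, PySem.List.pyGetD_natCast]
          exact hinv (i + 2) (by omega) (by omega)
        have hinv' : ∀ j : Nat, i < j → j < A.length → (P.set (i + 1) (pvGet P (↑(i + 2)))).getD j 0 = np A j := by
          intro j hij hjN
          rcases Nat.eq_or_lt_of_le (Nat.succ_le_of_lt hij) with h | h
          · rw [← h, getD_set_self _ _ _ (by omega), hval, hnp1, if_neg (by simp only [Bool.not_eq_true]; exact hpb)]
          · rw [getD_set_ne _ _ _ _ (by omega)]; exact hinv j (by omega) hjN
        obtain ⟨l1, l2, l3, l4⟩ := ih (P.set (i + 1) (pvGet P (↑(i + 2)))) cnt (by simp [hlen]) (by omega) hinv'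
        rw [hstep]
        refine ⟨l1, ?_, l3, ?_⟩
        · rw [l2, getD_set_ne _ _ _ _ (by omega)]
        · rw [l4, hrange, List.filter_append, List.length_append]
          have hpb' : predB A ((↑i : Int) + 1) = false := by rw [hlast]; exact hpb
          have h1 : (List.filter (predB A) [((↑i : Int) + 1)]).length = 0 := by
            simp [List.filter, hpb']
          omega

lemma loopA_back {A : List Int} {P : List Int} {bs : Int} {n : Nat}
    (hP : ∀ j : Nat, 1 ≤ j → j < A.length → pvGet P (↑j) = np A j)
    (hbs : 1 ≤ bs) (hNn : (A.length : Int) = (↑n : Int) * bs) :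
    ∀ (f k m : Nat), k ≤ n → 1 ≤ m → (∀ j < k, Covered A bs j) →
    checkLoop P bs f ((↑k : Int) * bs) (np A m) = (A.length : Int) →
    ∀ j < n, Covered A bs j := by
  intro f
  induction f with
  | zero =>
      intro k m hk hm hcov hres
      simp only [checkLoop] at hres
      have hkn : k = n := by
        have h2 := mul_right_cancel₀ (by omega : bs ≠ 0) (hres.trans hNn)
        exact_mod_cast h2
      intro j hj; exact hcov j (by omega)
  | succ f ih =>
      intro k m hk hm hcov hres
      simp only [checkLoop] at hres
      have hdone : (↑k : Int) * bs = (A.length : Int) → ∀ j < n, Covered A bs j := by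
        intro he
        have hkn : k = n := by
          have h2 := mul_right_cancel₀ (by omega : bs ≠ 0) (he.trans hNn)
          exact_mod_cast h2
        intro j hj; exact hcov j (by omega)
      by_cases h0 : np A m = 0
      · rw [if_pos h0] at hres; exact hdone hres
      · rcases np_mem hm with h | ⟨hle, hmem⟩
        · exact absurd h h0
        obtain ⟨hp1, hp2, hp3⟩ := mem_peakList.1 hmem
        rw [if_neg h0] at hres
        by_cases hbr : np A m > (↑k : Int) * bs + bs
        · rw [if_pos hbr] at hres; exact hdone hres
        · rw [if_neg hbr] at hres
          have hq1 : (1 : Int) ≤ np A m := hp1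
          have hcast : np A m + 1 = (((np A m).toNat + 1 : Nat) : Int) := by
            push_cast; omega
          have hqN : (np A m).toNat + 1 < A.length := by omega
          have hnext : pvGet P (np A m + 1) = np A ((np A m).toNat + 1) := by
            rw [hcast]; exact hP _ (by omega) hqN
          rw [hnext] at hres
          by_cases hin : np A m ≥ (↑k : Int) * bs ∧ np A m < (↑k : Int) * bs + bs
          · rw [if_pos hin] at hres
            have hi' : (↑k : Int) * bs + bs = (↑(k + 1) : Int) * bs := by push_cast; ring
            rw [hi'] at hres
            have hkn : k < n := by
              by_contra hkn
              have hke : k = n := by omega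
              subst hke
              have h1 := hin.1
              rw [← hNn] at h1
              omega
            refine ih (k + 1) ((np A m).toNat + 1) (by omega) (by omega) ?_ hres
            intro j hj
            rcases Nat.lt_or_ge j k with h | h
            · exact hcov j h
            · have : j = k := by omega
              subst this
              exact ⟨np A m, hmem, hin.1, by have := hin.2; linarith⟩
          · rw [if_neg hin] at hres
            exact ih k ((np A m).toNat + 1) hk (by omega) hcov hres

lemma loopA_fwd {A : List Int} {P : List Int} {bs : Int} {n : Nat}
    (hP : ∀ j : Nat, 1 ≤ j → j < A.length → pvGet P (↑j) = np A j)
    (hbs : 1 ≤ bs) (hNn : (A.length : Int) = (↑n : Int) * bs)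
    (hcov : ∀ j < n, Covered A bs j) :
    ∀ (f k m : Nat), k ≤ n → 1 ≤ m → m ≤ A.length - 1 → 3 ≤ A.length →
    (∀ p ∈ peakList A, p < (↑m : Int) → p < (↑k : Int) * bs) →
    A.length - m ≤ f →
    checkLoop P bs f ((↑k : Int) * bs) (np A m) = (A.length : Int) := by
  intro f
  induction f with
  | zero =>
      intro k m _ hm hmN hN _ hf
      omega
  | succ f ih =>
      intro k m hk hm hmN hN hINV hf
      simp only [checkLoop]
      rcases Nat.lt_or_ge k n with hkn | hkn
      · -- k < n : block k is covered, the loop cannot stop here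
        obtain ⟨p, hpL, hpk1, hpk2⟩ := hcov k hkn
        obtain ⟨hp1, hp2, _⟩ := mem_peakList.1 hpL
        have hmp : (↑m : Int) ≤ p := by
          by_contra hmp
          have := hINV p hpL (by omega)
          omega
        obtain ⟨h0, hnp_le⟩ := np_least hm hpL hmp
        rcases np_mem hm with h | ⟨hle, hmem⟩
        · exact absurd h h0
        obtain ⟨hq1, hq2, _⟩ := mem_peakList.1 hmem
        have hklin : ((↑k : Int) + 1) * bs = (↑k : Int) * bs + bs := by ring
        rw [if_neg h0, if_neg (by omega)]
        have hcast : np A m + 1 = (((np A m).toNat + 1 : Nat) : Int) := by push_cast; omega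
        have hnext : pvGet P (np A m + 1) = np A ((np A m).toNat + 1) := by
          rw [hcast]; exact hP _ (by omega) (by omega)
        rw [hnext]
        by_cases hin : np A m ≥ (↑k : Int) * bs ∧ np A m < (↑k : Int) * bs + bs
        · rw [if_pos hin]
          have hi' : (↑k : Int) * bs + bs = (↑(k + 1) : Nat) * bs := by push_cast; ring
          rw [hi']
          refine ih (k + 1) ((np A m).toNat + 1) (by omega) (by omega) (by omega) hN ?_ (by omega)
          intro p' hp'L hp'm
          obtain ⟨hr1, hr2, _⟩ := mem_peakList.1 hp'L
          push_cast
          omega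
        · have hin' : ¬ (np A m ≥ (↑k : Int) * bs) := by
            intro hge
            exact hin ⟨hge, by omega⟩
          rw [if_neg (by intro hc; exact hin' hc.1)]
          refine ih k ((np A m).toNat + 1) (by omega) (by omega) (by omega) hN ?_ (by omega)
          intro p' hp'L hp'm
          obtain ⟨hr1, hr2, _⟩ := mem_peakList.1 hp'L
          omega
      · -- k = n : i is already N, only trailing peaks remain to be skipped
        have hke : k = n := by omega
        subst hke
        by_cases h0 : np A m = 0
        · rw [if_pos h0, ← hNn]
        · rcases np_mem hm with h | ⟨hle, hmem⟩
          · exact absurd h h0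
          obtain ⟨hq1, hq2, _⟩ := mem_peakList.1 hmem
          rw [if_neg h0, if_neg (by rw [← hNn]; omega)]
          have hcast : np A m + 1 = (((np A m).toNat + 1 : Nat) : Int) := by push_cast; omega
          have hnext : pvGet P (np A m + 1) = np A ((np A m).toNat + 1) := by
            rw [hcast]; exact hP _ (by omega) (by omega)
          rw [hnext]
          rw [if_neg (by rw [← hNn]; intro hc; omega)]
          refine ih k ((np A m).toNat + 1) (by omega) (by omega) (by omega) hN ?_ (by omega)
          intro p' hp'L hp'm
          obtain ⟨hr1, hr2, _⟩ := mem_peakList.1 hp'L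
          rw [← hNn]
          omega

lemma setcount_iff {A : List Int} {bs : Int} {n : Nat}
    (hbs : 1 ≤ bs) (hNn : (A.length : Int) = (↑n : Int) * bs) :
    ((PySem.Set.ofList ((peakList A).map (fun p => PySem.Int.floordiv p bs))).length = n ↔
      ∀ k < n, Covered A bs k) := by
  set S := PySem.Set.ofList ((peakList A).map (fun p => PySem.Int.floordiv p bs)) with hS
  have hmemS : ∀ q : Int, q ∈ S ↔ ∃ p ∈ peakList A, PySem.Int.floordiv p bs = q := by
    intro q
    rw [hS, PySem.Set.mem_ofList, List.mem_map]
  have hfval : ∀ p q : Int, (PySem.Int.floordiv p bs = q ↔ q * bs ≤ p ∧ p < (q + 1) * bs) :=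
    fun p q => PySem.Int.floordiv_eq_iff_of_pos (by omega)
  have hbound : ∀ q ∈ S, 0 ≤ q ∧ q < (↑n : Int) := by
    intro q hq
    obtain ⟨p, hpL, hf⟩ := (hmemS q).1 hq
    obtain ⟨hp1, hp2, _⟩ := mem_peakList.1 hpL
    obtain ⟨hb1, hb2⟩ := (hfval p q).1 hf
    constructor
    · by_contra hq0
      have hq1 : q + 1 ≤ 0 := by omega
      have h2 : (q + 1) * bs ≤ 0 := by
        simpa using mul_le_mul_of_nonneg_right hq1 (by omega : (0:Int) ≤ bs)
      omega
    · have hpN : p < (↑n : Int) * bs := by omega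
      by_contra hqn
      have : (↑n : Int) ≤ q := by omega
      have := mul_le_mul_of_nonneg_right this (by omega : (0:Int) ≤ bs)
      omega
  have hcov_iff : ∀ k : Nat, ((↑k : Int) ∈ S ↔ Covered A bs k) := by
    intro k
    constructor
    · intro hk
      obtain ⟨p, hpL, hf⟩ := (hmemS _).1 hk
      obtain ⟨hb1, hb2⟩ := (hfval p _).1 hf
      exact ⟨p, hpL, hb1, hb2⟩
    · rintro ⟨p, hpL, hb1, hb2⟩
      exact (hmemS _).2 ⟨p, hpL, (hfval p _).2 ⟨hb1, hb2⟩⟩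
  have hnodup : S.Nodup := PySem.Set.nodup_ofList _
  have hcardT : S.toFinset.card = S.length := List.toFinset_card_of_nodup hnodup
  have hsub : S.toFinset ⊆ Finset.Icc (0 : Int) ((↑n : Int) - 1) := by
    intro q hq
    have := hbound q (List.mem_toFinset.1 hq)
    rw [Finset.mem_Icc]
    omega
  have hIcc : (Finset.Icc (0 : Int) ((↑n : Int) - 1)).card = n := by
    rw [Int.card_Icc]
    omega
  constructor
  · intro hlen k hk
    have heq : S.toFinset = Finset.Icc (0 : Int) ((↑n : Int) - 1) :=
      Finset.eq_of_subset_of_card_le hsub (by omega)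
    have : (↑k : Int) ∈ S.toFinset := by
      rw [heq, Finset.mem_Icc]
      omega
    exact (hcov_iff k).1 (List.mem_toFinset.1 this)
  · intro hcv
    have hsup : Finset.Icc (0 : Int) ((↑n : Int) - 1) ⊆ S.toFinset := by
      intro q hq
      rw [Finset.mem_Icc] at hq
      have hk : q.toNat < n := by omega
      have : (↑q.toNat : Int) ∈ S := (hcov_iff q.toNat).2 (hcv q.toNat hk)
      rw [List.mem_toFinset]
      rwa [show (↑q.toNat : Int) = q by omega] at this
    have := Finset.card_le_card hsub
    have := Finset.card_le_card hsup
    omega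

lemma checkBlock_iff {A : List Int} {P : List Int} {bs : Int} {n : Nat} (hN : 3 ≤ A.length)
    (hP : ∀ j : Nat, 1 ≤ j → j < A.length → pvGet P (↑j) = np A j)
    (hP0 : pvGet P 0 = np A 1) (hlen : P.length = A.length)
    (hbs : 1 ≤ bs) (hNn : (A.length : Int) = (↑n : Int) * bs) :
    (checkBlock bs P (↑A.length) = true ↔ ∀ k < n, Covered A bs k) := by
  rw [checkBlock, decide_eq_true_eq, hP0]
  have h0 : (0 : Int) = (↑(0 : Nat) : Int) * bs := by simp
  rw [h0]
  constructor
  · intro hres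
    exact loopA_back hP hbs hNn _ 0 1 (by omega) (by omega) (by omega) hres
  · intro hcov
    refine loopA_fwd hP hbs hNn hcov _ 0 1 (by omega) (by omega) (by omega) hN ?_ (by omega)
    intro p hpL hp1
    obtain ⟨h1, _, _⟩ := mem_peakList.1 hpL
    omega

lemma search_eq {A : List Int} {P : List Int} (hN : 3 ≤ A.length)
    (hP : ∀ j : Nat, 1 ≤ j → j < A.length → pvGet P (↑j) = np A j)
    (hP0 : pvGet P 0 = np A 1) (hlen : P.length = A.length) :
    ∀ c : Nat, searchA P (↑A.length) c = searchB (↑A.length) (peakList A) c := by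
  intro c
  induction c with
  | zero => rfl
  | succ c ihc =>
      rw [searchA, searchB]
      by_cases hmod : PySem.Int.mod (↑A.length) (↑(c + 1)) = 0
      · rw [if_pos hmod, if_pos hmod]
        have hdvd : ((↑(c + 1) : Int)) ∣ (↑A.length : Int) := (PySem.Int.mod_eq_zero_iff_dvd _ _).1 hmod
        set bs := PySem.Int.floordiv (↑A.length) (↑(c + 1)) with hbs
        have hbspos : 0 < ((c:Int) + 1) := by omega
        have hediv : bs = (↑A.length : Int) / (↑(c + 1) : Int) := by
          rw [hbs, PySem.Int.floordiv_eq_ediv_of_pos (by push_cast; omega)]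
        have hprod : (↑A.length : Int) = (↑(c + 1) : Int) * bs := by
          rw [hediv, Int.mul_ediv_cancel' hdvd]
        have hbs1 : 1 ≤ bs := by
          by_contra hb
          have hb0 : bs ≤ 0 := by omega
          have := mul_nonpos_of_nonneg_of_nonpos (by positivity : (0:Int) ≤ (↑(c+1) : Int)) hb0
          omega
        have hiff := (checkBlock_iff hN hP hP0 hlen hbs1 hprod).trans (setcount_iff hbs1 hprod).symm
        by_cases hcb : checkBlock bs P (↑A.length) = true
        · rw [if_pos hcb, if_pos (hiff.1 hcb)]
        · rw [if_neg hcb, if_neg (fun hc => hcb (hiff.2 hc)), ihc]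
      · rw [if_neg hmod, if_neg hmod, ihc]

lemma solution_eq_alt (A : List Int) : solution A = solution_alt A := by
  rw [solution, solution_alt]
  by_cases h3 : A.length < 3
  · rw [if_pos h3, if_pos h3]
  · rw [if_neg h3, if_neg h3]
    have hN : 3 ≤ A.length := by omega
    obtain ⟨f1, f2, f3, f4⟩ := fill_spec A (A.length - 2) (List.replicate A.length 0) 0
      (by simp) (by omega)
      (by
        intro j hj hjN
        rw [List.getD_eq_getElem?_getD, List.getElem?_replicate]
        rw [if_pos hjN]
        rw [np_unfold, if_pos (by omega)]
        rfl)
    have hcnt : (fillPeaks A (A.length - 2) (List.replicate A.length 0) 0).2 = (peakList A).length := by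
      rw [f4, show ((A.length - 2 : Nat) : Int) + 1 = (A.length : Int) - 1 from by omega, peakList]
      omega
    set pc := fillPeaks A (A.length - 2) (List.replicate A.length 0) 0 with hpc
    set P' := pc.1.set 0 (pvGet pc.1 1) with hP'def
    have hlenP' : P'.length = A.length := by rw [hP'def, List.length_set, f1]
    have hP : ∀ j : Nat, 1 ≤ j → j < A.length → pvGet P' (↑j) = np A j := by
      intro j hj hjN
      rw [pvGet, PySem.List.pyGetD_natCast, hP'def, getD_set_ne _ _ _ _ (by omega)]
      exact f3 j hj hjN
    have hP0 : pvGet P' 0 = np A 1 := by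
      rw [pvGet, PySem.List.pyGetD_zero, hP'def, getD_set_self _ _ _ (by omega)]
      rw [pvGet, PySem.List.pyGetD_ofNat' pc.1 1 0]
      exact f3 1 (by omega) (by omega)
    by_cases hz : pc.2 = 0
    · rw [if_pos hz]
      have : peakList A = [] := by
        rw [← List.length_eq_zero_iff, ← hcnt, hz]
      rw [if_pos this]
    · rw [if_neg hz, if_neg (by
        intro he
        apply hz
        rw [hcnt, he, List.length_nil])]
      rw [hcnt]
      exact search_eq hN hP hP0 hlenP' (peakList A).length

-- ===== VERDICT (by name: the statement is the Claim_ definition above) =====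
theorem solution_spec : Claim_equal_solution := by
  intro A _
  exact solution_eq_alt A
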